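-- pv_equiv track=rewrite | github.com/johncarpenter/sorkit | src/sorkit/frozen.py | is_path_frozen
-- ===== SOURCE A (Python) =====
-- def is_path_frozen(path: str, frozen_paths: list[str]) -> bool:
--     """Check if a file path matches any frozen path pattern.
--
--     Uses substring/prefix matching to handle both exact files and directories
--     (e.g., "tests/" matches "tests/test_foo.py").
--     """
--     for frozen in frozen_paths:
--         # Directory pattern: "tests/" matches any path starting with "tests/"
--         if frozen.endswith("/") and path.startswith(frozen):
--             return True
--         # Exact match
--         if path == frozen:
--             return True
--         # Path is inside a frozen directory (handles "tests" without trailing slash)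
--         if path.startswith(frozen + "/"):
--             return True
--     return False
-- ===== SOURCE B (Python) =====
-- def is_path_frozen(path: str, frozen_paths: list[str]) -> bool:
--     """Check if a file path matches any frozen path pattern.
--
--     Instead of scanning every pattern, derive the only candidate keys from
--     the path itself (the exact path, and at each '/' the prefix with and
--     without that slash) and look them up in a set of the frozen patterns.
--     """
--     frozens = set(frozen_paths)
--     if path in frozens:
--         return True
--     for i, ch in enumerate(path):
--         if ch == '/' and (path[:i] in frozens or path[:i + 1] in frozens):
--             return True
--     return False
-- ===== Notes on version B (the rewrite author's own statement) =====
-- stated objective: faster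
-- what changed: Instead of scanning every frozen pattern and running three startswith/equality tests per pattern, B builds a set of the patterns once and looks up only the candidate keys derivable from the path (the exact path, and at each '/' the prefix with and without the slash).
import Mathlib
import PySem

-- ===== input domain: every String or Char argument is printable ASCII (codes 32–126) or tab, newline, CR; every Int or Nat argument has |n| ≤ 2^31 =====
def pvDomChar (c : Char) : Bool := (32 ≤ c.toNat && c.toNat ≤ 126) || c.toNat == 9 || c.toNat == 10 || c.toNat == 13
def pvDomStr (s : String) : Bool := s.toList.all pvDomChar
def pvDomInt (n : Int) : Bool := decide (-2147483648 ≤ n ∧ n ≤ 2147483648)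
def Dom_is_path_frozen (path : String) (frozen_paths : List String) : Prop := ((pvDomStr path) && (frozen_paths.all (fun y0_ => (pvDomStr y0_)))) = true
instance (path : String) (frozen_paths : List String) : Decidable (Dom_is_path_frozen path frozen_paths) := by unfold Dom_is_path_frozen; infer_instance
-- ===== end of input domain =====

-- B replaces A's scan of every pattern (three prefix/equality tests each) by one set of the
-- patterns and lookups of the candidate keys derived from the path itself (alternative decomposition).

-- ===== PORT A =====
def is_path_frozen (path : String) (frozen_paths : List String) : Bool :=
  frozen_paths.any (fun frozen =>
    (PySem.Str.endswith frozen "/" && PySem.Str.startswith path frozen) ||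
    (path == frozen) ||
    PySem.Str.startswith path (frozen ++ "/"))

-- ===== PORT B =====
def is_path_frozen_alt (path : String) (frozen_paths : List String) : Bool :=
  let frozens : PySem.Set String := PySem.Set.ofList frozen_paths
  if PySem.Set.contains frozens path then true
  else
    (PySem.List.enumerate path.toList).any (fun p =>
      p.2 == '/' &&
        (PySem.Set.contains frozens (PySem.Str.slice path none (some p.1)) ||
         PySem.Set.contains frozens (PySem.Str.slice path none (some (p.1 + 1)))))

-- ===== PRECONDITION & SPEC =====
def Spec_is_path_frozen (path : String) (frozen_paths : List String) (out : Bool) : Prop := out = is_path_frozen_alt path frozen_paths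
instance (path : String) (frozen_paths : List String) (out : Bool) : Decidable (Spec_is_path_frozen path frozen_paths out) := by unfold Spec_is_path_frozen; infer_instance

-- ===== CLAIM (what is proved, stated in full; the proofs are below) =====
def Claim_equal_is_path_frozen : Prop := ∀ (path : String) (frozen_paths : List String), Dom_is_path_frozen path frozen_paths → Spec_is_path_frozen path frozen_paths (is_path_frozen path frozen_paths)

-- ===== LEMMAS AND PROOFS =====

-- (t ++ ['/']) is a prefix of cs iff some '/' in cs has exactly t before it
theorem pv_prefix_slash_iff (t cs : List Char) :
    (t ++ ['/']) <+: cs ↔ ∃ i, cs[i]? = some '/' ∧ t = cs.take i := by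
  constructor
  · intro h
    have hlen : t.length + 1 ≤ cs.length := by
      have := h.length_le; simpa using this
    have heq : t ++ ['/'] = cs.take (t.length + 1) := by
      have := List.prefix_iff_eq_take.mp h
      simpa using this
    refine ⟨t.length, ?_, ?_⟩
    · have h2 : cs[t.length]? = (cs.take (t.length + 1))[t.length]? := by
        rw [List.getElem?_take]; simp
      rw [h2, ← heq]
      simp
    · have := congrArg (List.take t.length) heq
      simpa [List.take_left, List.take_take] using this
  · rintro ⟨i, hi, rfl⟩
    have hlt : i < cs.length := by
      by_contra h
      simp [List.getElem?_eq_none (by omega : cs.length ≤ i)] at hi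
    have : cs.take (i + 1) = cs.take i ++ ['/'] := by
      rw [List.take_add_one, hi]; rfl
    rw [← this]
    exact List.take_prefix _ _

-- a nonempty prefix of cs ending in '/' is exactly a take up to (and including) a slash of cs
theorem pv_endslash_prefix_iff (L cs : List Char) :
    (['/'] <:+ L ∧ L <+: cs) ↔ ∃ i, cs[i]? = some '/' ∧ L = cs.take (i + 1) := by
  constructor
  · rintro ⟨⟨t, rfl⟩, hp⟩
    obtain ⟨i, hi, rfl⟩ := (pv_prefix_slash_iff t cs).mp hp
    have hlt : i < cs.length := by
      by_contra h
      simp [List.getElem?_eq_none (by omega : cs.length ≤ i)] at hi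
    refine ⟨i, hi, ?_⟩
    rw [List.take_add_one, hi]; rfl
  · rintro ⟨i, hi, rfl⟩
    have hlt : i < cs.length := by
      by_contra h
      simp [List.getElem?_eq_none (by omega : cs.length ≤ i)] at hi
    have hsplit : cs.take (i + 1) = cs.take i ++ ['/'] := by
      rw [List.take_add_one, hi]; rfl
    constructor
    · rw [hsplit]; exact ⟨_, rfl⟩
    · exact List.take_prefix _ _

-- membership in the set of patterns is membership in the list
theorem pv_mem_iff (fp : List String) (x : String) :
    PySem.Set.contains (PySem.Set.ofList fp) x = true ↔ x ∈ fp := by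
  rw [PySem.Set.contains_iff, PySem.Set.mem_ofList]

-- the slice path[:k] is a frozen pattern iff some pattern's characters are take k of the path
theorem pv_slice_mem_iff (fp : List String) (path : String) (k : Nat) :
    PySem.Set.contains (PySem.Set.ofList fp) (PySem.Str.slice path none (some (k : Int))) = true ↔
      ∃ f ∈ fp, f.toList = path.toList.take k := by
  rw [pv_mem_iff]
  constructor
  · intro h
    refine ⟨_, h, ?_⟩
    simp [PySem.Str.toList_slice, PySem.List.slice_to_natCast]
  · rintro ⟨f, hf, ht⟩
    have : f = PySem.Str.slice path none (some (k : Int)) := by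
      apply String.toList_inj.mp
      rw [ht]; simp [PySem.Str.toList_slice, PySem.List.slice_to_natCast]
    rwa [← this]

-- characterisation of A's scan
theorem pv_A_iff (path : String) (fp : List String) :
    is_path_frozen path fp = true ↔
      ∃ f ∈ fp, (∃ i, path.toList[i]? = some '/' ∧ f.toList = path.toList.take (i + 1)) ∨
        path = f ∨ (∃ i, path.toList[i]? = some '/' ∧ f.toList = path.toList.take i) := by
  unfold is_path_frozen
  rw [List.any_eq_true]
  refine exists_congr fun f => and_congr_right fun hf => ?_
  simp only [Bool.or_eq_true, Bool.and_eq_true, beq_iff_eq,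
    PySem.Str.startswith_eq, PySem.Str.endswith_eq,
    PySem.Chars.startswith_iff, PySem.Chars.endswith_iff]
  have htl : (f ++ "/").toList = f.toList ++ ['/'] := by simp
  have hsl : "/".toList = ['/'] := rfl
  rw [htl, hsl, pv_prefix_slash_iff, ← pv_endslash_prefix_iff]
  tauto

-- characterisation of B's candidate-key lookups
theorem pv_B_iff (path : String) (fp : List String) :
    is_path_frozen_alt path fp = true ↔
      (∃ f ∈ fp, path = f) ∨
        ∃ i, path.toList[i]? = some '/' ∧
          ((∃ f ∈ fp, f.toList = path.toList.take i) ∨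
           (∃ f ∈ fp, f.toList = path.toList.take (i + 1))) := by
  unfold is_path_frozen_alt
  have hmem : (∃ f ∈ fp, path = f) ↔ path ∈ fp := by
    constructor
    · rintro ⟨f, hf, rfl⟩; exact hf
    · intro h; exact ⟨path, h, rfl⟩
  by_cases hc : PySem.Set.contains (PySem.Set.ofList fp) path = true
  · simp only [hc, if_true]
    simp only [true_iff]
    exact Or.inl (hmem.mpr ((pv_mem_iff fp path).mp hc))
  · simp only [Bool.not_eq_true] at hc
    simp only [hc, Bool.false_eq_true, if_false, List.any_eq_true]
    constructor
    · rintro ⟨p, hp, hcond⟩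
      obtain ⟨k, hk, rfl⟩ := (PySem.List.mem_enumerate_iff _ _ _).mp hp
      simp only [Bool.and_eq_true, Bool.or_eq_true, beq_iff_eq] at hcond
      obtain ⟨hch, hor⟩ := hcond
      refine Or.inr ⟨k, ?_, ?_⟩
      · rw [List.getElem?_eq_getElem hk]
        simpa using hch
      · rcases hor with h | h
        · left
          have := (pv_slice_mem_iff fp path k).mp (by simpa using h)
          exact this
        · right
          have h' : PySem.Set.contains (PySem.Set.ofList fp)
              (PySem.Str.slice path none (some ((k + 1 : Nat) : Int))) = true := by
            push_cast
            simpa using h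
          exact (pv_slice_mem_iff fp path (k + 1)).mp h'
    · rintro (h | ⟨i, hi, hor⟩)
      · have := (pv_mem_iff fp path).mpr (hmem.mp h)
        rw [hc] at this
        exact absurd this (by simp)
      · have hlt : i < path.toList.length := by
          by_contra hbad
          simp [List.getElem?_eq_none (by omega : path.toList.length ≤ i)] at hi
        refine ⟨((i : Int), path.toList[i]), (PySem.List.mem_enumerate_iff _ _ _).mpr ⟨i, hlt, by simp⟩, ?_⟩
        simp only [Bool.and_eq_true, Bool.or_eq_true, beq_iff_eq]
        constructor
        · have := List.getElem?_eq_getElem hlt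
          rw [this] at hi
          exact Option.some.inj hi
        · rcases hor with h | h
          · exact Or.inl (by simpa using (pv_slice_mem_iff fp path i).mpr h)
          · refine Or.inr ?_
            have := (pv_slice_mem_iff fp path (i + 1)).mpr h
            push_cast at this
            simpa using this

-- ===== VERDICT (by name: the statement is the Claim_ definition above) =====
theorem is_path_frozen_spec : Claim_equal_is_path_frozen := by
  intro path fp _
  unfold Spec_is_path_frozen
  rw [Bool.eq_iff_iff, pv_A_iff, pv_B_iff]
  constructor
  · rintro ⟨f, hf, h⟩
    rcases h with ⟨i, hi, ht⟩ | h | ⟨i, hi, ht⟩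
    · exact Or.inr ⟨i, hi, Or.inr ⟨f, hf, ht⟩⟩
    · exact Or.inl ⟨f, hf, h⟩
    · exact Or.inr ⟨i, hi, Or.inl ⟨f, hf, ht⟩⟩
  · rintro (⟨f, hf, h⟩ | ⟨i, hi, ⟨f, hf, ht⟩ | ⟨f, hf, ht⟩⟩)
    · exact ⟨f, hf, Or.inr (Or.inl h)⟩
    · exact ⟨f, hf, Or.inr (Or.inr ⟨i, hi, ht⟩)⟩
    · exact ⟨f, hf, Or.inl ⟨i, hi, ht⟩⟩
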